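-- pv_equiv track=rewrite | github.com/Fioledan/AIDlabs | 5.1.py | python_assignments_with_constraints
-- ===== SOURCE A (Python) =====
-- import itertools
--
-- def python_assignments_with_constraints(K, N, fighter_levels, object_difficulties):
--     fighters, objects = range(K), range(N)
--     if K >= N:
--         perms = itertools.permutations(fighters, N)
--         return [list(zip(perm, range(N))) for perm in perms if all(fighter_levels[f] >= object_difficulties[obj] for f, obj in zip(perm, range(N)))]
--     else:
--         combs = itertools.combinations(objects, K)
--         return [list(zip(range(K), comb)) for comb in combs if all(fighter_levels[f] >= object_difficulties[obj] for f, obj in zip(range(K), comb))]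
-- ===== SOURCE B (Python) =====
-- def python_assignments_with_constraints(K, N, fighter_levels, object_difficulties):
--     results = []
--     if K >= N:
--         # candidate fighters per object, precomputed once; DFS assigns objects
--         # 0..N-1 distinct fighters in increasing order (lexicographic), pruned
--         cand = [[f for f in range(K) if fighter_levels[f] >= object_difficulties[i]]
--                 for i in range(N)]
--         used = set()
--         assign = []
--         def dfs(i):
--             if i == N:
--                 results.append(assign.copy())
--                 return
--             for f in cand[i]:
--                 if f not in used:
--                     used.add(f)
--                     assign.append((f, i))
--                     dfs(i + 1)
--                     assign.pop()
--                     used.remove(f)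
--         dfs(0)
--     else:
--         # fighter i gets an object with strictly increasing index (a combination),
--         # pruning on the first failed level check
--         assign = []
--         def dfs(i, start):
--             if i == K:
--                 results.append(assign.copy())
--                 return
--             lvl = fighter_levels[i]
--             for obj in range(start, N - (K - i) + 1):
--                 if lvl >= object_difficulties[obj]:
--                     assign.append((i, obj))
--                     dfs(i + 1, obj + 1)
--                     assign.pop()
--         dfs(0, 0)
--     return results
-- ===== Notes on version B (the rewrite author's own statement) =====
-- stated objective: faster
-- what changed: A materialises every permutation/combination and filters afterwards; B does a DFS backtracking search in the same lexicographic order over precomputed per-object candidate lists, extending an in-place partial assignment only while the level>=difficulty checks hold, so invalid branches are pruned at the first violation.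
-- outside the precondition, e.g. on python_assignments_with_constraints(4, 5, [0, 4, 0, 4], [4, 4, 4, 4]): A returns [], B returns []; on python_assignments_with_constraints(2, 2, [-10, -10], [0]): A returns [], B raises IndexError
import Mathlib
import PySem

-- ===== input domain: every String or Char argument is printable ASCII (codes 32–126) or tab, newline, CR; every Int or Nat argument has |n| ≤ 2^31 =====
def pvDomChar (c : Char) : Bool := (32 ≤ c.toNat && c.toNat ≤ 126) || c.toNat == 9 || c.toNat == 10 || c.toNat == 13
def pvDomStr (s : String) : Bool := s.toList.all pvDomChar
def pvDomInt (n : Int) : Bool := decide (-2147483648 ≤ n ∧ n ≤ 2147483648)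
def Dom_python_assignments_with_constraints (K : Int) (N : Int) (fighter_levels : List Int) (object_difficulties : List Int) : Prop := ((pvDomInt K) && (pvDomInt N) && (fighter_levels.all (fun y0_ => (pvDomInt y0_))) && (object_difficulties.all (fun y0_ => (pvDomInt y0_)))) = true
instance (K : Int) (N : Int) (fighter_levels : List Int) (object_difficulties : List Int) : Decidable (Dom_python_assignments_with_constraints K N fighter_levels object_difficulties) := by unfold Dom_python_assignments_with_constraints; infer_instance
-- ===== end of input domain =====

-- B replaces A's generate-all-then-filter over itertools.permutations/combinations by a pruned
-- DFS backtracking search in the same lexicographic order (objective: faster — intended as faster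
-- via pruning; a timing run measured between 1.1x and 227x across runs at the sizes both
-- finished, not confirmed at the largest generated sizes, where both are exponential in the worst case).

-- ===== PORT A =====
-- fighter_levels[f] >= object_difficulties[obj]; pyGet? models Python's IndexError as none
-- (an out-of-range index is excluded by Pre_; 'false' there never matters inside Pre_)
def pvOkA (fl od : List Int) (f obj : Int) : Bool :=
  match PySem.List.pyGet? fl f, PySem.List.pyGet? od obj with
  | some a, some b => decide (a ≥ b)
  | _, _ => false

-- itertools.permutations(pool, r) in its lexicographic output order (pool has no duplicates)
def pyPermutations (pool : List Int) : Nat → List (List Int)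
  | 0 => [[]]
  | r + 1 => pool.flatMap (fun x => (pyPermutations (pool.erase x) r).map (x :: ·))

-- itertools.combinations(pool, r) in its lexicographic output order
def pyCombinations : List Int → Nat → List (List Int)
  | _, 0 => [[]]
  | [], _ + 1 => []
  | x :: rest, r + 1 => ((pyCombinations rest r).map (x :: ·)) ++ pyCombinations rest (r + 1)

def python_assignments_with_constraints (K : Int) (N : Int) (fighter_levels : List Int) (object_difficulties : List Int) : List (List (Int × Int)) :=
  if K ≥ N then
    let objs := PySem.List.pyRange 0 N 1
    ((pyPermutations (PySem.List.pyRange 0 K 1) N.toNat).filter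
        (fun perm => (perm.zip objs).all (fun p => pvOkA fighter_levels object_difficulties p.1 p.2))).map
      (fun perm => perm.zip objs)
  else
    let fighters := PySem.List.pyRange 0 K 1
    ((pyCombinations (PySem.List.pyRange 0 N 1) K.toNat).filter
        (fun comb => (fighters.zip comb).all (fun p => pvOkA fighter_levels object_difficulties p.1 p.2))).map
      (fun comb => fighters.zip comb)

-- ===== PORT B =====
-- Source B's comprehension condition fighter_levels[f] >= object_difficulties[i]
def pvCanDo (fl od : List Int) (f i : Int) : Bool :=
  decide (PySem.List.pyGetD fl f 0 ≥ PySem.List.pyGetD od i 0)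

-- DFS for K >= N over the precomputed candidate lists; rem = N - i remaining objects;
-- Source B's `used` set is the PySem set-as-distinct-list, add = append of an absent element
def pvDfsPerm (cand : List (List Int)) : Nat → Int → List Int → List (Int × Int) → List (List (Int × Int))
  | 0, _, _, assign => [assign]
  | rem + 1, i, used, assign =>
      (PySem.List.pyGetD cand i []).flatMap (fun f =>
        if ¬ used.contains f then
          pvDfsPerm cand rem (i + 1) (used ++ [f]) (assign ++ [(f, i)])
        else [])

-- DFS for K < N: fighter i gets an object with index ≥ start; rem = K - i remaining fighters
def pvDfsComb (fl od : List Int) (N : Int) : Nat → Int → Int → List (Int × Int) → List (List (Int × Int))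
  | 0, _, _, assign => [assign]
  | rem + 1, i, start, assign =>
      -- Source B's loop bound range(start, N - (K - i) + 1); here K - i = rem + 1, so the end is N - rem
      (PySem.List.pyRange start (N - rem) 1).flatMap (fun obj =>
        if PySem.List.pyGetD fl i 0 ≥ PySem.List.pyGetD od obj 0 then
          pvDfsComb fl od N rem (i + 1) (obj + 1) (assign ++ [(i, obj)])
        else [])

def python_assignments_with_constraints_alt (K : Int) (N : Int) (fighter_levels : List Int) (object_difficulties : List Int) : List (List (Int × Int)) :=
  if K ≥ N then
    pvDfsPerm ((PySem.List.pyRange 0 N 1).map (fun i =>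
      (PySem.List.pyRange 0 K 1).filter (fun f => pvCanDo fighter_levels object_difficulties f i))) N.toNat 0 [] []
  else
    pvDfsComb fighter_levels object_difficulties N K.toNat 0 0 []

-- ===== PRECONDITION & SPEC =====
-- Pre_ excludes negative K/N (A raises ValueError) and lists too short for the indexed
-- positions (A raises IndexError); because A's `all` short-circuits, A may still return on a
-- few short-list inputs where every branch fails before the out-of-range index is touched.
def Pre_python_assignments_with_constraints (K : Int) (N : Int) (fighter_levels : List Int) (object_difficulties : List Int) : Prop :=
  0 ≤ K ∧ 0 ≤ N ∧ (K = 0 ∨ N = 0 ∨ (K ≤ (fighter_levels.length : Int) ∧ N ≤ (object_difficulties.length : Int)))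
instance (K : Int) (N : Int) (fighter_levels : List Int) (object_difficulties : List Int) : Decidable (Pre_python_assignments_with_constraints K N fighter_levels object_difficulties) := by unfold Pre_python_assignments_with_constraints; infer_instance

def pvWitness_python_assignments_with_constraints : Int × Int × List Int × List Int := (3, 2, [1, 0, 2], [1, 2])

def Spec_python_assignments_with_constraints (K : Int) (N : Int) (fighter_levels : List Int) (object_difficulties : List Int) (out : List (List (Int × Int))) : Prop := out = python_assignments_with_constraints_alt K N fighter_levels object_difficulties
instance (K : Int) (N : Int) (fighter_levels : List Int) (object_difficulties : List Int) (out : List (List (Int × Int))) : Decidable (Spec_python_assignments_with_constraints K N fighter_levels object_difficulties out) := by unfold Spec_python_assignments_with_constraints; infer_instance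

-- ===== CLAIM (what is proved, stated in full; the proofs are below) =====
def Claim_equal_python_assignments_with_constraints : Prop := ∀ (K : Int) (N : Int) (fighter_levels : List Int) (object_difficulties : List Int), Dom_python_assignments_with_constraints K N fighter_levels object_difficulties → Pre_python_assignments_with_constraints K N fighter_levels object_difficulties → Spec_python_assignments_with_constraints K N fighter_levels object_difficulties (python_assignments_with_constraints K N fighter_levels object_difficulties)

-- ===== LEMMAS AND PROOFS =====

lemma pv_flatMap_congr {α β : Type} (l : List α) (f g : α → List β)
    (h : ∀ x ∈ l, f x = g x) : l.flatMap f = l.flatMap g := by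
  induction l with
  | nil => rfl
  | cons a l ih =>
      simp only [List.flatMap_cons, h a (by simp), ih (fun x hx => h x (by simp [hx]))]

lemma pv_flatMap_if_filter {α β : Type} (l : List α) (p : α → Prop) [DecidablePred p]
    (g : α → List β) :
    l.flatMap (fun x => if p x then g x else []) = (l.filter (fun x => decide (p x))).flatMap g := by
  induction l with
  | nil => rfl
  | cons a l ih => by_cases h : p a <;> simp [List.flatMap_cons, h, ih]

lemma pv_all_congr_mem {α : Type} (l : List α) (p q : α → Bool)
    (h : ∀ x ∈ l, p x = q x) : l.all p = l.all q := by
  induction l with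
  | nil => rfl
  | cons a l ih =>
      simp only [List.all_cons, h a (by simp), ih (fun x hx => h x (by simp [hx]))]

lemma pv_mem_pyPermutations_subset (pool : List Int) (r : Nat) (p : List Int)
    (hp : p ∈ pyPermutations pool r) : p ⊆ pool := by
  induction r generalizing pool p with
  | zero => simp [pyPermutations] at hp; simp [hp]
  | succ r ih =>
      simp only [pyPermutations, List.mem_flatMap, List.mem_map] at hp
      obtain ⟨x, hx, q, hq, rfl⟩ := hp
      intro y hy
      rcases List.mem_cons.mp hy with rfl | hy
      · exact hx
      · exact List.erase_subset (ih _ _ hq hy)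

lemma pv_mem_pyCombinations_subset (pool : List Int) (r : Nat) (c : List Int)
    (hc : c ∈ pyCombinations pool r) : c ⊆ pool := by
  induction pool generalizing r c with
  | nil =>
      cases r with
      | zero => simp [pyCombinations] at hc; simp [hc]
      | succ r => simp [pyCombinations] at hc
  | cons x rest ih =>
      cases r with
      | zero => simp [pyCombinations] at hc; simp [hc]
      | succ r =>
          simp only [pyCombinations, List.mem_append, List.mem_map] at hc
          rcases hc with ⟨q, hq, rfl⟩ | hc
          · intro y hy
            rcases List.mem_cons.mp hy with rfl | hy
            · exact List.mem_cons_self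
            · exact List.mem_cons_of_mem _ (ih _ _ hq hy)
          · exact fun y hy => List.mem_cons_of_mem _ (ih _ _ hc hy)

-- the DFS of B's permutation branch = generate-then-filter, with B's check
lemma pv_dfsPerm_eq (fl od : List Int) (K N : Int) :
    ∀ (rem : Nat) (i : Int) (used : List Int) (assign : List (Int × Int)),
      0 ≤ i → i + rem = N →
      pvDfsPerm ((PySem.List.pyRange 0 N 1).map (fun j =>
          (PySem.List.pyRange 0 K 1).filter (fun f => pvCanDo fl od f j))) rem i used assign
        = ((pyPermutations ((PySem.List.pyRange 0 K 1).filter (fun f => ¬ used.contains f)) rem).filter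
              (fun p => (p.zip (PySem.List.pyRange i N 1)).all (fun q => pvCanDo fl od q.1 q.2))).map
            (fun p => assign ++ p.zip (PySem.List.pyRange i N 1)) := by
  intro rem
  induction rem with
  | zero =>
      intro i used assign h0 hi
      simp [pvDfsPerm, pyPermutations]
  | succ rem ih =>
      intro i used assign h0 hi
      have hiN : i < N := by push_cast at hi; omega
      rw [PySem.List.pyRange_one_cons hiN]
      simp only [pyPermutations]
      rw [List.filter_flatMap, List.map_flatMap]
      -- bring the right-hand side to `flatMap (if ok then … else [])` form
      have hRHS : ∀ x ∈ ((PySem.List.pyRange 0 K 1).filter (fun f => ¬ used.contains f)),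
          List.map (fun p => assign ++ p.zip (i :: PySem.List.pyRange (i + 1) N 1))
            (List.filter
              (fun p => (p.zip (i :: PySem.List.pyRange (i + 1) N 1)).all (fun q => pvCanDo fl od q.1 q.2))
              (List.map (x :: ·)
                (pyPermutations
                  (((PySem.List.pyRange 0 K 1).filter (fun f => ¬ used.contains f)).erase x) rem)))
          = (if pvCanDo fl od x i = true then
              List.map (fun q => (assign ++ [(x, i)]) ++ q.zip (PySem.List.pyRange (i + 1) N 1))
                (List.filter
                  (fun q => (q.zip (PySem.List.pyRange (i + 1) N 1)).all (fun q => pvCanDo fl od q.1 q.2))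
                  (pyPermutations
                    (((PySem.List.pyRange 0 K 1).filter (fun f => ¬ used.contains f)).erase x) rem))
            else []) := by
        intro x hx
        rw [List.filter_map, List.map_map]
        have hpred : ((fun p => (p.zip (i :: PySem.List.pyRange (i + 1) N 1)).all
                (fun q => pvCanDo fl od q.1 q.2)) ∘ (x :: ·))
            = fun q => pvCanDo fl od x i
                && (q.zip (PySem.List.pyRange (i + 1) N 1)).all (fun q => pvCanDo fl od q.1 q.2) := by
          funext q
          simp [Function.comp, List.zip_cons_cons, List.all_cons]
        rw [hpred]
        by_cases hok : pvCanDo fl od x i = true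
        · rw [if_pos hok]
          simp only [hok, Bool.true_and]
          apply List.map_congr_left
          intro q _
          simp [List.zip_cons_cons, List.append_assoc]
        · rw [if_neg hok]
          have hokb : pvCanDo fl od x i = false := by
            revert hok; cases pvCanDo fl od x i <;> simp
          simp [hokb]
      rw [pv_flatMap_congr _ _ _ hRHS]
      rw [pv_flatMap_if_filter _ (fun x => pvCanDo fl od x i = true) _]
      -- unfold one DFS step on the left, index the candidate table
      rw [pvDfsPerm]
      rw [PySem.List.pyGetD_map_pyRange_of_nonneg
            (fun j => (PySem.List.pyRange 0 K 1).filter (fun f => pvCanDo fl od f j)) N i [] h0 hiN]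
      rw [pv_flatMap_if_filter _ (fun f => ¬ used.contains f) _]
      rw [List.filter_filter, List.filter_filter]
      -- the two filtered pools agree pointwise
      have hpools : ((PySem.List.pyRange 0 K 1).filter
            fun a => decide ¬(used.contains a = true) && pvCanDo fl od a i)
          = ((PySem.List.pyRange 0 K 1).filter
            fun a => decide (pvCanDo fl od a i = true) && decide ¬(used.contains a = true)) := by
        apply List.filter_congr
        intro a _
        cases h1 : used.contains a <;> cases h2 : pvCanDo fl od a i <;> simp
      rw [hpools]
      apply pv_flatMap_congr
      intro x hx
      rw [ih (i + 1) (used ++ [x]) (assign ++ [(x, i)]) (by omega) (by push_cast at hi ⊢; omega)]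
      have hpool : ((PySem.List.pyRange 0 K 1).filter fun f => ¬ (used ++ [x]).contains f)
          = (((PySem.List.pyRange 0 K 1).filter fun f => ¬ used.contains f).erase x) := by
        rw [List.Nodup.erase_eq_filter (List.Nodup.filter _ (PySem.List.nodup_pyRange_one 0 K)) x,
            List.filter_filter]
        apply List.filter_congr
        intro a _
        cases h1 : used.contains a <;> cases h2 : a == x <;> simp_all
      rw [hpool]

lemma pv_pyCombinations_nil (pool : List Int) (r : Nat) (h : pool.length < r) :
    pyCombinations pool r = [] := by
  induction pool generalizing r with
  | nil => cases r with
      | zero => omega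
      | succ r => rfl
  | cons x rest ih =>
      cases r with
      | zero => omega
      | succ r =>
          simp only [pyCombinations]
          rw [ih r (by simpa using h), ih (r + 1) (by simp at h ⊢; omega)]
          rfl

-- the DFS of B's combination branch = generate-then-filter, with B's check
lemma pv_dfsComb_eq (fl od : List Int) (N : Int) :
    ∀ (m : Nat) (start : Int), (N - start).toNat = m →
    ∀ (rem : Nat) (i : Int) (assign : List (Int × Int)),
      pvDfsComb fl od N rem i start assign
        = ((pyCombinations (PySem.List.pyRange start N 1) rem).filter
              (fun c => ((PySem.List.pyRange i (i + rem) 1).zip c).all (fun q => pvCanDo fl od q.1 q.2))).map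
            (fun c => assign ++ (PySem.List.pyRange i (i + rem) 1).zip c) := by
  intro m
  induction m with
  | zero =>
      intro start hm rem i assign
      have hNs : N ≤ start := by omega
      cases rem with
      | zero => simp [pvDfsComb, pyCombinations, PySem.List.pyRange_one_eq_nil (le_refl i)]
      | succ rem =>
          rw [PySem.List.pyRange_one_eq_nil hNs]
          simp [pvDfsComb, pyCombinations,
            PySem.List.pyRange_one_eq_nil (show N - (rem : Int) ≤ start by omega)]
  | succ m ihm =>
      intro start hm rem i assign
      have hsN : start < N := by omega
      have hm' : (N - (start + 1)).toNat = m := by omega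
      cases rem with
      | zero => simp [pvDfsComb, pyCombinations, PySem.List.pyRange_one_eq_nil (le_refl i)]
      | succ rem =>
          by_cases hlt : start + (rem : Int) < N
          case neg =>
            rw [pvDfsComb]
            rw [PySem.List.pyRange_one_eq_nil (show N - (rem : Int) ≤ start by omega)]
            rw [pv_pyCombinations_nil _ _ (by rw [PySem.List.length_pyRange_one]; omega)]
            simp
          rw [PySem.List.pyRange_one_cons hsN]
          simp only [pyCombinations]
          rw [List.filter_append, List.map_append]
          rw [pvDfsComb]
          rw [PySem.List.pyRange_one_cons (show start < N - (rem : Int) by omega), List.flatMap_cons]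
          congr 1
          · have hii : i < i + ((rem + 1 : Nat) : Int) := by push_cast; omega
            rw [PySem.List.pyRange_one_cons hii]
            rw [List.filter_map, List.map_map]
            have hpred : ((fun c => (((i : Int) :: PySem.List.pyRange (i + 1) (i + ((rem + 1 : Nat) : Int)) 1).zip c).all
                    (fun q => pvCanDo fl od q.1 q.2)) ∘ (start :: ·))
                = fun c => pvCanDo fl od i start
                    && ((PySem.List.pyRange (i + 1) (i + ((rem + 1 : Nat) : Int)) 1).zip c).all
                        (fun q => pvCanDo fl od q.1 q.2) := by
              funext c
              simp [Function.comp, List.zip_cons_cons, List.all_cons]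
            rw [hpred]
            by_cases hok : PySem.List.pyGetD fl i 0 ≥ PySem.List.pyGetD od start 0
            · rw [if_pos hok, ihm (start + 1) hm' rem (i + 1) (assign ++ [(i, start)])]
              have hend : (i + 1) + ((rem : Nat) : Int) = i + ((rem + 1 : Nat) : Int) := by
                push_cast; ring
              rw [hend]
              have hokb : pvCanDo fl od i start = true := by unfold pvCanDo; exact decide_eq_true hok
              simp only [hokb, Bool.true_and]
              apply List.map_congr_left
              intro c _
              simp [List.zip_cons_cons, List.append_assoc]
            · rw [if_neg hok]
              have hokb : pvCanDo fl od i start = false := by unfold pvCanDo; simpa using hok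
              simp [hokb]
          · have hstep : (PySem.List.pyRange (start + 1) (N - rem) 1).flatMap
                (fun obj => if PySem.List.pyGetD fl i 0 ≥ PySem.List.pyGetD od obj 0 then
                    pvDfsComb fl od N rem (i + 1) (obj + 1) (assign ++ [(i, obj)]) else [])
                = pvDfsComb fl od N (rem + 1) i (start + 1) assign := by
              rw [pvDfsComb]
            rw [hstep, ihm (start + 1) hm' (rem + 1) i assign]

-- inside Pre_, A's pyGet?-based check coincides with B's pyGetD-based check
lemma pv_ok_eq (fl od : List Int) (f obj : Int)
    (h1 : 0 ≤ f) (h2 : f < (fl.length : Int)) (h3 : 0 ≤ obj) (h4 : obj < (od.length : Int)) :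
    pvOkA fl od f obj = pvCanDo fl od f obj := by
  unfold pvOkA pvCanDo
  rw [PySem.List.pyGet?_eq_some_getElem (xs := fl) h1 (by exact_mod_cast h2),
      PySem.List.pyGet?_eq_some_getElem (xs := od) h3 (by exact_mod_cast h4),
      PySem.List.pyGetD_eq_getElem (xs := fl) (d := 0) h1 (by exact_mod_cast h2),
      PySem.List.pyGetD_eq_getElem (xs := od) (d := 0) h3 (by exact_mod_cast h4)]

-- ===== VERDICT (by name: the statement is the Claim_ definition above) =====
theorem python_assignments_with_constraints_spec : Claim_equal_python_assignments_with_constraints := by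
  intro K N fl od hdom hpre
  obtain ⟨hK, hN, hcase⟩ := hpre
  unfold Spec_python_assignments_with_constraints python_assignments_with_constraints
    python_assignments_with_constraints_alt
  by_cases hKN : K ≥ N
  · rw [if_pos hKN, if_pos hKN]
    by_cases hN0 : N = 0
    · subst hN0
      simp [pvDfsPerm, pyPermutations, PySem.List.pyRange_one_eq_nil (le_refl (0 : Int))]
    · have hb : K ≤ (fl.length : Int) ∧ N ≤ (od.length : Int) := by
        rcases hcase with h | h | h
        · omega
        · omega
        · exact h
      rw [pv_dfsPerm_eq fl od K N N.toNat 0 [] [] le_rfl (by simp [Int.toNat_of_nonneg hN])]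
      have hAD : (pyPermutations (PySem.List.pyRange 0 K 1) N.toNat).filter
            (fun perm => (perm.zip (PySem.List.pyRange 0 N 1)).all fun p => pvOkA fl od p.1 p.2)
          = (pyPermutations (PySem.List.pyRange 0 K 1) N.toNat).filter
            (fun perm => (perm.zip (PySem.List.pyRange 0 N 1)).all fun p => pvCanDo fl od p.1 p.2) := by
        apply List.filter_congr
        intro perm hperm
        apply pv_all_congr_mem
        rintro ⟨f, obj⟩ hq
        obtain ⟨hf, hobj⟩ := List.of_mem_zip hq
        have hf' := pv_mem_pyPermutations_subset _ _ _ hperm hf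
        rw [PySem.List.mem_pyRange_one] at hf' hobj
        exact pv_ok_eq fl od f obj hf'.1 (by omega) hobj.1 (by omega)
      dsimp only
      rw [hAD]
      simp
  · rw [if_neg hKN, if_neg hKN]
    by_cases hK0 : K = 0
    · subst hK0
      simp [pvDfsComb, pyCombinations, PySem.List.pyRange_one_eq_nil (le_refl (0 : Int))]
    · have hb : K ≤ (fl.length : Int) ∧ N ≤ (od.length : Int) := by
        rcases hcase with h | h | h
        · exact absurd h hK0
        · omega
        · exact h
      rw [pv_dfsComb_eq fl od N (N - 0).toNat 0 rfl K.toNat 0 []]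
      have h0K : (0 : Int) + ((K.toNat : Nat) : Int) = K := by simp [Int.toNat_of_nonneg hK]
      rw [h0K]
      have hAD : (pyCombinations (PySem.List.pyRange 0 N 1) K.toNat).filter
            (fun comb => ((PySem.List.pyRange 0 K 1).zip comb).all fun p => pvOkA fl od p.1 p.2)
          = (pyCombinations (PySem.List.pyRange 0 N 1) K.toNat).filter
            (fun comb => ((PySem.List.pyRange 0 K 1).zip comb).all fun p => pvCanDo fl od p.1 p.2) := by
        apply List.filter_congr
        intro comb hcomb
        apply pv_all_congr_mem
        rintro ⟨f, obj⟩ hq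
        obtain ⟨hf, hobj⟩ := List.of_mem_zip hq
        have hobj' := pv_mem_pyCombinations_subset _ _ _ hcomb hobj
        rw [PySem.List.mem_pyRange_one] at hf hobj'
        exact pv_ok_eq fl od f obj hf.1 (by omega) hobj'.1 (by omega)
      dsimp only
      rw [hAD]
      simp
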